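-- pv_equiv track=rewrite | github.com/1-Liam/DENSN-Atlas | fixtures/lease_lock/target/validator.py | validate_trace
-- ===== SOURCE A (Python) =====
-- def validate_trace(events):
--     """
--     Buggy reference implementation: it remembers only that ACQUIRE happened once.
--     It does not model the hidden lease-live state correctly after RELEASE.
--     """
--     saw_acquire = False
--     for event in events:
--         if event == "ACQUIRE":
--             saw_acquire = True
--         elif event == "RELEASE":
--             if not saw_acquire:
--                 return False
--         elif event == "MUTATE" and not saw_acquire:
--             return False
--         else:
--             return False
--     return True
-- ===== SOURCE B (Python) =====
-- def validate_trace(events):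
--     # Closed form: the flag in A never resets, and MUTATE always falls into a
--     # rejecting branch, so a trace is valid iff it is empty, or it starts with
--     # ACQUIRE and contains only ACQUIRE/RELEASE tokens.
--     return not events or (
--         events[0] == "ACQUIRE"
--         and all(e in ("ACQUIRE", "RELEASE") for e in events)
--     )
-- ===== Notes on version B (the rewrite author's own statement) =====
-- stated objective: simpler
-- what changed: Replaces the stateful scan with a single closed-form boolean: empty, or first token ACQUIRE and every token in (ACQUIRE, RELEASE), exploiting that A's flag never resets and that MUTATE always hits a rejecting branch.
import Mathlib
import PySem

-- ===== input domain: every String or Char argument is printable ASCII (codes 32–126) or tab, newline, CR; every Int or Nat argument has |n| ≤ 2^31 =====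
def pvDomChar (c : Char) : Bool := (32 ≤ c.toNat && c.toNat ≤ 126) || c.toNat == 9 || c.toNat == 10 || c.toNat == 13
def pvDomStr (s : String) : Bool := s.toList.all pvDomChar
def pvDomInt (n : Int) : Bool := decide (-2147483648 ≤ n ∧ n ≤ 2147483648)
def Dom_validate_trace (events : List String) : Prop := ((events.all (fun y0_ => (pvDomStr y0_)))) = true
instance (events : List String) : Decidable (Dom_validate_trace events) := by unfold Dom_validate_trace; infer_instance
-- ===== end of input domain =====

-- B replaces A's stateful flag scan by a closed-form boolean (simpler, same O(n) cost).

-- ===== PORT A =====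
-- literal port of A's loop: the flag `saw_acquire` threaded through the scan
def validate_trace_loop (saw_acquire : Bool) : List String → Bool
  | [] => true
  | event :: rest =>
    if event == "ACQUIRE" then validate_trace_loop true rest
    else if event == "RELEASE" then
      if !saw_acquire then false else validate_trace_loop saw_acquire rest
    else if event == "MUTATE" && !saw_acquire then false
    else false

def validate_trace (events : List String) : Bool :=
  validate_trace_loop false events

-- ===== PORT B =====
def validate_trace_alt (events : List String) : Bool :=
  match events with
  | [] => true
  | e0 :: _ =>
    e0 == "ACQUIRE" && events.all (fun e => e == "ACQUIRE" || e == "RELEASE")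

-- ===== PRECONDITION & SPEC =====
def Spec_validate_trace (events : List String) (out : Bool) : Prop := out = validate_trace_alt events
instance (events : List String) (out : Bool) : Decidable (Spec_validate_trace events out) := by unfold Spec_validate_trace; infer_instance

-- ===== CLAIM (what is proved, stated in full; the proofs are below) =====
def Claim_equal_validate_trace : Prop := ∀ (events : List String), Dom_validate_trace events → Spec_validate_trace events (validate_trace events)

-- ===== LEMMAS AND PROOFS =====

-- once the flag is set, the loop just checks that every token is ACQUIRE/RELEASE
lemma validate_trace_loop_true (l : List String) :
    validate_trace_loop true l = l.all (fun e => e == "ACQUIRE" || e == "RELEASE") := by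
  induction l with
  | nil => rfl
  | cons e rest ih =>
    simp only [validate_trace_loop, List.all_cons]
    by_cases hA : e == "ACQUIRE"
    · simp [hA, ih]
    · by_cases hR : e == "RELEASE" <;> simp [hA, hR, ih]

-- ===== VERDICT (by name: the statement is the Claim_ definition above) =====
theorem validate_trace_spec : Claim_equal_validate_trace := by
  intro events _
  unfold Spec_validate_trace validate_trace validate_trace_alt
  cases events with
  | nil => rfl
  | cons e0 rest =>
    simp only [validate_trace_loop, List.all_cons]
    by_cases hA : e0 == "ACQUIRE"
    · simp [hA, validate_trace_loop_true]
    · by_cases hR : e0 == "RELEASE" <;> simp [hA, hR]
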